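-- pv_equiv track=rewrite | github.com/DylanMeeus/AdventOfCode | 2024/7/main.py | can_solve
-- ===== SOURCE A (Python) =====
-- def can_solve(t, c, acc) -> bool:
--     if len(c) == 0 and acc == t:
--         return True
--
--     if len(c) == 0 or acc > t:
--         return False
--
--     to_consume = c[0]
--     remainder = c[1:]
--     return can_solve(t, remainder, acc + to_consume) or can_solve(t, remainder, acc * to_consume)
-- ===== SOURCE B (Python) =====
-- def can_solve(t, c, acc) -> bool:
--     frontier = {acc}
--     for x in c:
--         new = set()
--         for a in frontier:
--             if a <= t:
--                 new.add(a + x)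
--                 new.add(a * x)
--         frontier = new
--     return t in frontier
-- ===== Notes on version B (the rewrite author's own statement) =====
-- stated objective: alternative
-- what changed: Replaces the binary recursion over operator choices with an iterative breadth-first sweep maintaining a set of reachable accumulator values (deduplicated per level), checking membership of t at the end.
import Mathlib
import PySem

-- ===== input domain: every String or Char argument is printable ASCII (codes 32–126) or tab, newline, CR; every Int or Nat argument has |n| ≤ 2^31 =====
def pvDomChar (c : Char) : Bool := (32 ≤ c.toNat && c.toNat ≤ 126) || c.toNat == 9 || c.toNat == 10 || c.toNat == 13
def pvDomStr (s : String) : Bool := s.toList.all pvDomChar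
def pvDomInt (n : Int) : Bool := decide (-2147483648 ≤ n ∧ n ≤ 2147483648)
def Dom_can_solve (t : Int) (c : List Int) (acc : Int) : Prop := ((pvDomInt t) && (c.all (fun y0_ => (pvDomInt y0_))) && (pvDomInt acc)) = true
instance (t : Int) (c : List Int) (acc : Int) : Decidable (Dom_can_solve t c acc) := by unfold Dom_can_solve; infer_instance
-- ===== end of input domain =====

-- B replaces A's binary recursion over +/* choices with an iterative level-by-level
-- sweep of a set of reachable accumulator values; same return value, no side effects.

-- ===== PORT A =====
-- A's two leading 'if's collapse by cases on c: empty c returns (acc == t);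
-- nonempty c returns false when acc > t, else the two recursive calls or-ed.
def can_solve (t : Int) (c : List Int) (acc : Int) : Bool :=
  match c with
  | [] => acc == t
  | to_consume :: remainder =>
    if acc > t then false
    else can_solve t remainder (acc + to_consume) || can_solve t remainder (acc * to_consume)

-- ===== PORT B =====
-- one step of B's outer loop: expand every a ≤ t in the frontier by +x and *x into a fresh set
def csStep (t x : Int) (frontier : PySem.Set Int) : PySem.Set Int :=
  frontier.foldl
    (fun s a => if a ≤ t then PySem.Set.add (PySem.Set.add s (a + x)) (a * x) else s)
    PySem.Set.empty

def can_solve_alt (t : Int) (c : List Int) (acc : Int) : Bool :=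
  PySem.Set.contains (c.foldl (fun f x => csStep t x f) (PySem.Set.ofList [acc])) t

-- ===== PRECONDITION & SPEC =====
def Spec_can_solve (t : Int) (c : List Int) (acc : Int) (out : Bool) : Prop := out = can_solve_alt t c acc
instance (t : Int) (c : List Int) (acc : Int) (out : Bool) : Decidable (Spec_can_solve t c acc out) := by unfold Spec_can_solve; infer_instance

-- ===== CLAIM (what is proved, stated in full; the proofs are below) =====
def Claim_equal_can_solve : Prop := ∀ (t : Int) (c : List Int) (acc : Int), Dom_can_solve t c acc → Spec_can_solve t c acc (can_solve t c acc)

-- ===== LEMMAS AND PROOFS =====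

-- membership in one expansion step
theorem mem_csStep (t x b : Int) (s : PySem.Set Int) :
    b ∈ csStep t x s ↔ ∃ a ∈ s, a ≤ t ∧ (b = a + x ∨ b = a * x) := by
  unfold csStep
  suffices h : ∀ (l : List Int) (init : PySem.Set Int),
      b ∈ l.foldl (fun s a => if a ≤ t then PySem.Set.add (PySem.Set.add s (a + x)) (a * x) else s) init
      ↔ b ∈ init ∨ ∃ a ∈ l, a ≤ t ∧ (b = a + x ∨ b = a * x) by
    rw [h]
    simp [PySem.Set.empty]
  intro l
  induction l with
  | nil => simp
  | cons a l ih =>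
    intro init
    simp only [List.foldl_cons, ih]
    by_cases ha : a ≤ t <;> simp [ha, PySem.Set.mem_add, or_assoc]

-- frontier invariant: t reachable from the fold iff reachable (per A) from some frontier element
theorem frontier_invariant (t : Int) (c : List Int) :
    ∀ (s : PySem.Set Int),
      (t ∈ c.foldl (fun f x => csStep t x f) s) ↔ ∃ a ∈ s, can_solve t c a = true := by
  induction c with
  | nil =>
    intro s
    simp [can_solve]
  | cons x c ih =>
    intro s
    simp only [List.foldl_cons, ih]
    constructor
    · rintro ⟨b, hb, hsolve⟩
      rw [mem_csStep] at hb
      rcases hb with ⟨a, ha, hle, hb⟩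
      refine ⟨a, ha, ?_⟩
      simp only [can_solve, if_neg (not_lt.mpr hle), Bool.or_eq_true]
      rcases hb with rfl | rfl
      · exact Or.inl hsolve
      · exact Or.inr hsolve
    · rintro ⟨a, ha, hsolve⟩
      simp only [can_solve] at hsolve
      by_cases hgt : a > t
      · simp [hgt] at hsolve
      · rw [if_neg hgt, Bool.or_eq_true] at hsolve
        rcases hsolve with h | h
        · exact ⟨a + x, (mem_csStep t x _ s).mpr ⟨a, ha, not_lt.mp hgt, Or.inl rfl⟩, h⟩
        · exact ⟨a * x, (mem_csStep t x _ s).mpr ⟨a, ha, not_lt.mp hgt, Or.inr rfl⟩, h⟩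

-- ===== VERDICT (by name: the statement is the Claim_ definition above) =====
theorem can_solve_spec : Claim_equal_can_solve := by
  intro t c acc _
  unfold Spec_can_solve can_solve_alt
  rw [Bool.eq_iff_iff, PySem.Set.contains_iff, frontier_invariant]
  simp [PySem.Set.mem_ofList]
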